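-- pv_equiv track=rewrite | github.com/ushio2580/cvss-scoring-system | backend/app/services/cvss_service.py | generate_vector
-- ===== SOURCE A (Python) =====
-- from typing import Dict, Optional, Tuple
--
-- def generate_vector(metrics: Dict[str, str]) -> str:
--     """Generate CVSS vector string from metrics"""
--     vector_parts = []
--
--     # Add base metrics in order
--     base_order = ['AV', 'AC', 'PR', 'UI', 'S', 'C', 'I', 'A']
--     for metric in base_order:
--         if metric in metrics:
--             vector_parts.append(f"{metric}:{metrics[metric]}")
--
--     # Add temporal metrics
--     temporal_order = ['E', 'RL', 'RC']
--     for metric in temporal_order: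
--         if metric in metrics:
--             vector_parts.append(f"{metric}:{metrics[metric]}")
--
--     # Add environmental metrics
--     env_order = ['CR', 'IR', 'AR', 'MAV', 'MAC', 'MPR', 'MUI', 'MS', 'MC', 'MI', 'MA']
--     for metric in env_order:
--         if metric in metrics:
--             vector_parts.append(f"{metric}:{metrics[metric]}")
--
--     return f"CVSS:3.1/{'/'.join(vector_parts)}"
-- ===== SOURCE B (Python) =====
-- _ORDER = ['AV', 'AC', 'PR', 'UI', 'S', 'C', 'I', 'A',
--           'E', 'RL', 'RC',
--           'CR', 'IR', 'AR', 'MAV', 'MAC', 'MPR', 'MUI', 'MS', 'MC', 'MI', 'MA']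
-- _RANK = {m: i for i, m in enumerate(_ORDER)}
--
--
-- def generate_vector(metrics):
--     """Generate CVSS vector string from metrics"""
--     tagged = sorted(((_RANK[k], f"{k}:{v}") for k, v in metrics.items() if k in _RANK),
--                     key=lambda t: t[0])
--     return "CVSS:3.1/" + "/".join(s for _, s in tagged)
-- ===== Notes on version B (the rewrite author's own statement) =====
-- stated objective: alternative
-- what changed: Instead of three sequential scans over fixed metric-order lists with a dict membership test each, B builds one rank table once, makes a single pass over metrics.items() collecting (rank, 'K:V') pairs for known keys, sorts by rank and joins.
import Mathlib
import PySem

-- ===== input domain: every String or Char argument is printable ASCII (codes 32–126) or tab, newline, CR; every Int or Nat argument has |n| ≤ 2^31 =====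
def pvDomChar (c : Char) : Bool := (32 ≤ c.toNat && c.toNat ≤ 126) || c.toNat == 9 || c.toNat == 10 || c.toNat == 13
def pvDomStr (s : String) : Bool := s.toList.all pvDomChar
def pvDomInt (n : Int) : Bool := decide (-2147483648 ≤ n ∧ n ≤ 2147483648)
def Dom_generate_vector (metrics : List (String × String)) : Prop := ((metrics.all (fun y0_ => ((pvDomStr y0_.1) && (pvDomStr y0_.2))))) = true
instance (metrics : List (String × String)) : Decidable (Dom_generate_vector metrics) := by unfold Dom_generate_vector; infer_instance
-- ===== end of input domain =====

-- B replaces A's three fixed-order scans by one pass over the input collecting (rank, "K:V")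
-- pairs from a precomputed rank table, then sorts by rank (objective: alternative, same cost).

-- ===== PORT A =====
-- first-match lookup in the association list (= Python dict membership + subscript on unique keys)
def gvLookup {β : Type} (ms : List (String × β)) (k : String) : Option β :=
  match ms with
  | [] => none
  | (a, b) :: t => if a == k then some b else gvLookup t k

-- loop body: "if metric in metrics: vector_parts.append(f'{metric}:{metrics[metric]}')"
def gvStep (metrics : List (String × String)) (acc : List String) (m : String) : List String :=
  match gvLookup metrics m with
  | some v => acc ++ [m ++ ":" ++ v]
  | none => acc

def generate_vector (metrics : List (String × String)) : String :=
  let vector_parts : List String := []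
  let base_order : List String := ["AV", "AC", "PR", "UI", "S", "C", "I", "A"]
  let vector_parts := base_order.foldl (gvStep metrics) vector_parts
  let temporal_order : List String := ["E", "RL", "RC"]
  let vector_parts := temporal_order.foldl (gvStep metrics) vector_parts
  let env_order : List String := ["CR", "IR", "AR", "MAV", "MAC", "MPR", "MUI", "MS", "MC", "MI", "MA"]
  let vector_parts := env_order.foldl (gvStep metrics) vector_parts
  "CVSS:3.1/" ++ PySem.Str.join "/" vector_parts

-- ===== PORT B =====
def gvOrder : List String :=
  ["AV", "AC", "PR", "UI", "S", "C", "I", "A",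
   "E", "RL", "RC",
   "CR", "IR", "AR", "MAV", "MAC", "MPR", "MUI", "MS", "MC", "MI", "MA"]

-- _RANK = {m: i for i, m in enumerate(_ORDER)}
def gvRank : List (String × Int) := gvOrder.zipIdx.map (fun p => (p.1, (p.2 : Int)))

def generate_vector_alt (metrics : List (String × String)) : String :=
  let tagged := metrics.filterMap
    (fun kv => (gvLookup gvRank kv.1).map (fun r => (r, kv.1 ++ ":" ++ kv.2)))
  let tagged := PySem.List.sorted tagged (fun t => t.1) false
  "CVSS:3.1/" ++ PySem.Str.join "/" (tagged.map (fun t => t.2))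

-- ===== PRECONDITION & SPEC =====
-- Pre_ excludes association lists with duplicate keys: those cannot arise from a Python dict
-- argument, and which of the duplicate values wins is an accident of the representation.
def Pre_generate_vector (metrics : List (String × String)) : Prop :=
  (metrics.map Prod.fst).Nodup
instance (metrics : List (String × String)) : Decidable (Pre_generate_vector metrics) := by
  unfold Pre_generate_vector; infer_instance

def pvWitness_generate_vector : (List (String × String)) := [("AV", "N"), ("C", "H"), ("XX", "y")]

def Spec_generate_vector (metrics : List (String × String)) (out : String) : Prop :=
  out = generate_vector_alt metrics
instance (metrics : List (String × String)) (out : String) : Decidable (Spec_generate_vector metrics out) := by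
  unfold Spec_generate_vector; infer_instance

-- ===== CLAIM (what is proved, stated in full; the proofs are below) =====
def Claim_equal_generate_vector : Prop := ∀ (metrics : List (String × String)), Dom_generate_vector metrics → Pre_generate_vector metrics → Spec_generate_vector metrics (generate_vector metrics)

-- ===== LEMMAS AND PROOFS =====

-- the target list: scan the rank table, keep metrics present in ms, in table order
def gvTgtOf (ms : List (String × String)) (l : List (String × Int)) : List (Int × String) :=
  l.filterMap (fun nr => (gvLookup ms nr.1).map (fun v => (nr.2, nr.1 ++ ":" ++ v)))

theorem gvLookup_cons {β : Type} (a : String) (b : β) (t : List (String × β)) (k : String) :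
    gvLookup ((a, b) :: t) k = if a == k then some b else gvLookup t k := rfl

theorem gvLookup_eq_none {β : Type} {ms : List (String × β)} {k : String}
    (h : k ∉ ms.map Prod.fst) : gvLookup ms k = none := by
  induction ms with
  | nil => rfl
  | cons p t ih =>
    obtain ⟨a, b⟩ := p
    simp only [List.map_cons, List.mem_cons, not_or] at h
    rw [gvLookup_cons, if_neg, ih h.2]
    simp only [beq_eq_false_iff_ne, ne_eq, Bool.not_eq_true]
    exact fun e => h.1 (by simp_all)

theorem gvTgtOf_cons (ms : List (String × String)) (nr : String × Int)
    (t : List (String × Int)) :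
    gvTgtOf ms (nr :: t)
      = ((gvLookup ms nr.1).map (fun v => (nr.2, nr.1 ++ ":" ++ v))).toList ++ gvTgtOf ms t := by
  cases h : gvLookup ms nr.1 <;> simp [gvTgtOf, h]

theorem gvTgtOf_zip_cons (ms : List (String × String)) (m : String) (t : List String)
    (off : Nat) :
    gvTgtOf ms (((m :: t).zipIdx off).map (fun q => (q.1, (q.2 : Int))))
      = ((gvLookup ms m).map (fun v => ((off : Int), m ++ ":" ++ v))).toList
        ++ gvTgtOf ms ((t.zipIdx (off + 1)).map (fun q => (q.1, (q.2 : Int)))) := by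
  rw [List.zipIdx_cons, List.map_cons, gvTgtOf_cons]

theorem gvTgtOf_congr {ms ms' : List (String × String)} {l : List (String × Int)}
    (h : ∀ nr ∈ l, gvLookup ms nr.1 = gvLookup ms' nr.1) : gvTgtOf ms l = gvTgtOf ms' l := by
  induction l with
  | nil => rfl
  | cons nr t ih =>
    rw [gvTgtOf_cons, gvTgtOf_cons, h nr (by simp), ih (fun x hx => h x (by simp [hx]))]

-- A's loop over one order list appends exactly the present metrics, formatted
theorem gv_foldA (ms : List (String × String)) (l : List String) (acc : List String) :
    l.foldl (gvStep ms) acc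
      = acc ++ l.filterMap (fun m => (gvLookup ms m).map (fun v => m ++ ":" ++ v)) := by
  induction l generalizing acc with
  | nil => simp
  | cons m t ih =>
    cases h : gvLookup ms m with
    | none => simp [gvStep, h, ih]
    | some v => simp [gvStep, h, ih]

-- projecting the tagged target list gives A's formatted parts
theorem gv_tgt_snd (ms : List (String × String)) (l : List String) (off : Nat) :
    (gvTgtOf ms ((l.zipIdx off).map (fun q => (q.1, (q.2 : Int))))).map Prod.snd
      = l.filterMap (fun m => (gvLookup ms m).map (fun v => m ++ ":" ++ v)) := by
  induction l generalizing off with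
  | nil => rfl
  | cons m t ih =>
    rw [gvTgtOf_zip_cons, List.map_append, ih (off + 1), List.filterMap_cons]
    cases gvLookup ms m <;> simp

theorem gv_tgt_lb (ms : List (String × String)) (l : List String) (off : Nat) :
    ∀ p ∈ gvTgtOf ms ((l.zipIdx off).map (fun q => (q.1, (q.2 : Int)))), (off : Int) ≤ p.1 := by
  induction l generalizing off with
  | nil => intro p hp; simp [gvTgtOf] at hp
  | cons m t ih =>
    intro p hp
    rw [gvTgtOf_zip_cons] at hp
    cases h : gvLookup ms m with
    | none =>
      rw [h] at hp
      simp only [Option.map_none, Option.toList_none, List.nil_append] at hp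
      have := ih (off + 1) p hp
      omega
    | some v =>
      rw [h] at hp
      simp only [Option.map_some, Option.toList_some, List.singleton_append,
        List.mem_cons] at hp
      rcases hp with hp | hp
      · simp [hp]
      · have := ih (off + 1) p hp
        omega

theorem gv_tgt_pairwise (ms : List (String × String)) (l : List String) (off : Nat) :
    (gvTgtOf ms ((l.zipIdx off).map (fun q => (q.1, (q.2 : Int))))).Pairwise
      (fun a b => a.1 < b.1) := by
  induction l generalizing off with
  | nil => simp [gvTgtOf]
  | cons m t ih =>
    rw [gvTgtOf_zip_cons]
    cases h : gvLookup ms m with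
    | none =>
      simp only [Option.map_none, Option.toList_none, List.nil_append]
      exact ih (off + 1)
    | some v =>
      simp only [Option.map_some, Option.toList_some, List.singleton_append]
      refine List.pairwise_cons.mpr ⟨?_, ih (off + 1)⟩
      intro p hp
      have := gv_tgt_lb ms t (off + 1) p hp
      have hc : ((off + 1 : Nat) : Int) = (off : Int) + 1 := by push_cast; ring
      simp only []
      omega

-- consing a fresh key to ms inserts (at its rank position) one tagged entry
theorem gv_tgt_cons (l : List (String × Int)) (hnd : (l.map Prod.fst).Nodup)
    (k v : String) (rest : List (String × String)) (hrest : gvLookup rest k = none) :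
    (gvTgtOf ((k, v) :: rest) l).Perm
      (((gvLookup l k).map (fun r => (r, k ++ ":" ++ v))).toList ++ gvTgtOf rest l) := by
  induction l with
  | nil => simp [gvTgtOf, gvLookup]
  | cons nr t ih =>
    obtain ⟨n, r⟩ := nr
    simp only [List.map_cons, List.nodup_cons] at hnd
    rw [gvTgtOf_cons, gvTgtOf_cons (ms := rest), gvLookup_cons]
    dsimp only
    by_cases hnk : n = k
    · subst hnk
      have htail : gvTgtOf ((n, v) :: rest) t = gvTgtOf rest t := by
        apply gvTgtOf_congr
        intro x hx
        have hxn : x.1 ≠ n := fun e => hnd.1 (e ▸ List.mem_map_of_mem hx)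
        have hb : (n == x.1) = false := beq_eq_false_iff_ne.mpr (fun e => hxn e.symm)
        rw [gvLookup_cons]
        simp [hb]
      rw [htail, hrest, gvLookup_cons]
      simp
    · have hbeq : (n == k) = false := beq_eq_false_iff_ne.mpr hnk
      have hb2 : (k == n) = false := beq_eq_false_iff_ne.mpr (fun e => hnk e.symm)
      rw [gvLookup_cons]
      simp only [hb2, hbeq, Bool.false_eq_true, if_false]
      have ih' := ih hnd.2
      cases ho : gvLookup rest n with
      | none =>
        simpa using ih'
      | some w =>
        simp only [Option.map_some, Option.toList_some, List.singleton_append]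
        cases hm : gvLookup t k with
        | none =>
          rw [hm] at ih'
          simp only [Option.map_none, Option.toList_none, List.nil_append] at ih' ⊢
          exact ih'.cons _
        | some r' =>
          rw [hm] at ih'
          simp only [Option.map_some, Option.toList_some, List.singleton_append] at ih' ⊢
          exact (ih'.cons (r, n ++ ":" ++ w)).trans (List.Perm.swap _ _ _)

-- B's one-pass tagged list is a permutation of the table-ordered target list
theorem gv_tagged_perm (ms : List (String × String)) (hnd : (ms.map Prod.fst).Nodup) :
    (ms.filterMap
      (fun kv => (gvLookup gvRank kv.1).map (fun r => (r, kv.1 ++ ":" ++ kv.2)))).Perm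
      (gvTgtOf ms gvRank) := by
  induction ms with
  | nil => simp [gvTgtOf, gvLookup]
  | cons kv rest ih =>
    obtain ⟨k, v⟩ := kv
    simp only [List.map_cons, List.nodup_cons] at hnd
    have hrest : gvLookup rest k = none := gvLookup_eq_none hnd.1
    have hrank : (gvRank.map Prod.fst).Nodup := by decide
    have hc := gv_tgt_cons gvRank hrank k v rest hrest
    rw [List.filterMap_cons]
    cases h : gvLookup gvRank k with
    | none =>
      rw [h] at hc
      simp only [Option.map_none, Option.toList_none, List.nil_append] at hc ⊢
      exact (ih hnd.2).trans hc.symm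
    | some r =>
      rw [h] at hc
      simp only [Option.map_some, Option.toList_some, List.singleton_append] at hc ⊢
      exact ((ih hnd.2).cons _).trans hc.symm

theorem gv_sorted_eq (ms : List (String × String)) (hnd : (ms.map Prod.fst).Nodup) :
    PySem.List.sorted
      (ms.filterMap (fun kv => (gvLookup gvRank kv.1).map (fun r => (r, kv.1 ++ ":" ++ kv.2))))
      (fun t => t.1) false = gvTgtOf ms gvRank := by
  exact PySem.List.sorted_eq_of_perm_of_pairwise_lt _ _ _
    (gv_tagged_perm ms hnd).symm (gv_tgt_pairwise ms gvOrder 0)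

-- ===== VERDICT (by name: the statement is the Claim_ definition above) =====
theorem generate_vector_spec : Claim_equal_generate_vector := by
  intro metrics _hdom hpre
  unfold Spec_generate_vector generate_vector generate_vector_alt
  dsimp only
  rw [gv_sorted_eq metrics hpre]
  have hsnd := gv_tgt_snd metrics gvOrder 0
  have hrank : gvRank = (gvOrder.zipIdx 0).map (fun q => (q.1, (q.2 : Int))) := rfl
  rw [hrank, hsnd]
  have horder : gvOrder
      = ["AV", "AC", "PR", "UI", "S", "C", "I", "A"]
        ++ ["E", "RL", "RC"]
        ++ ["CR", "IR", "AR", "MAV", "MAC", "MPR", "MUI", "MS", "MC", "MI", "MA"] := rfl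
  simp only [gv_foldA, List.nil_append]
  rw [horder, List.filterMap_append, List.filterMap_append]
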